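-- pv_equiv track=rewrite | github.com/Make7UpYours/Code-Portfolio | Spring 2013/Python/Mastermind Game.py | hint_func
-- ===== SOURCE A (Python) =====
-- def hint_func(user_str, rand_str):
--     """Iterates through the user_str and compares the digits to the digits in
--         rand_str returning a string of a sorted hint_list."""
--     # initalize an empty hint_list and a proper starting value for index
--     hint_list = []
--     index = 0
--     while index < len(user_str):
--         if user_str[index] == rand_str[index]:
--             hint_list.append("X")
--             index += 1
--         elif user_str[index] in rand_str:
--             hint_list.append("O")
--             index += 1
--         else:
--             hint_list.append("-")
--             index += 1
--     # reverse the sort() in order to obtain proper output for our hints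
--     hint_list.sort(reverse = True)
--     return "".join(hint_list)
-- ===== SOURCE B (Python) =====
-- def hint_func(user_str, rand_str):
--     """One pass classifying each position into exact/present/absent counts,
--     then builds the hint string directly (no list, no sort)."""
--     exact = present = absent = 0
--     for i in range(len(user_str)):
--         if user_str[i] == rand_str[i]:
--             exact += 1
--         elif user_str[i] in rand_str:
--             present += 1
--         else:
--             absent += 1
--     return "X" * exact + "O" * present + "-" * absent
-- ===== Notes on version B (the rewrite author's own statement) =====
-- stated objective: simpler
-- what changed: Replaces build-a-label-list-then-reverse-sort-and-join with a single counting pass (three counters) and direct construction 'X'*exact+'O'*present+'-'*absent, eliminating the sort and the intermediate list.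
import Mathlib
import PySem

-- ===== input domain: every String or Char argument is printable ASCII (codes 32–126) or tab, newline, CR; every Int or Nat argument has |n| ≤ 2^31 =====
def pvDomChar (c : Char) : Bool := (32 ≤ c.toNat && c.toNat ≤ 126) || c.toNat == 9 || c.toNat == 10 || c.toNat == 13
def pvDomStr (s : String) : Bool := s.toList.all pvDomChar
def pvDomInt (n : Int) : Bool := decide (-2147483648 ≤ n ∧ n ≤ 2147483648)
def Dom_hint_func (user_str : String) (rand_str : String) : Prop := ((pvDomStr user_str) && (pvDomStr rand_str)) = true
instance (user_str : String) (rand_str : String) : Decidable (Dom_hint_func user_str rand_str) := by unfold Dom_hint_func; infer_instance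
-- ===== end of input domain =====

-- B replaces A's build-labels/reverse-sort/join with a single counting pass and direct
-- construction of the hint string (objective: simpler — the sort disappears).


-- ===== PORT A =====
-- the while-loop appending "X"/"O"/"-" labels; rand_str[index] is total here only
-- under Pre_ (len user_str ≤ len rand_str), where pyGetD agrees with Python's indexing;
-- fuel only makes the recursion structural: fuel = len(user_str) bounds the iteration count,
-- so the loop runs exactly as Python's 'while index < len(user_str)' 
def hintLoopA (u r : List Char) (fuel : Nat) (index : Nat) (hint_list : List Char) : List Char :=
  match fuel with
  | 0 => hint_list
  | f + 1 =>
    if _h : index < u.length then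
      if u[index] = PySem.List.pyGetD r (index : Int) ' ' then
        hintLoopA u r f (index + 1) (hint_list ++ ['X'])
      else if PySem.Chars.isIn [u[index]] r then
        hintLoopA u r f (index + 1) (hint_list ++ ['O'])
      else
        hintLoopA u r f (index + 1) (hint_list ++ ['-'])
    else hint_list

def hint_func (user_str : String) (rand_str : String) : String :=
  String.mk (PySem.List.sorted (hintLoopA user_str.toList rand_str.toList user_str.toList.length 0 []) (fun x => x) true)

-- ===== PORT B =====
-- one pass keeping three counters, then direct construction
def hintCountB (u r : List Char) (fuel : Nat) (i : Nat) (exact present absent : Nat) : Nat × Nat × Nat :=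
  match fuel with
  | 0 => (exact, present, absent)
  | f + 1 =>
    if _h : i < u.length then
      if u[i] = PySem.List.pyGetD r (i : Int) ' ' then
        hintCountB u r f (i + 1) (exact + 1) present absent
      else if PySem.Chars.isIn [u[i]] r then
        hintCountB u r f (i + 1) exact (present + 1) absent
      else
        hintCountB u r f (i + 1) exact present (absent + 1)
    else (exact, present, absent)

def hint_func_alt (user_str : String) (rand_str : String) : String :=
  let c := hintCountB user_str.toList rand_str.toList user_str.toList.length 0 0 0 0
  String.mk (List.replicate c.1 'X' ++ List.replicate c.2.1 'O' ++ List.replicate c.2.2 '-')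

-- ===== PRECONDITION & SPEC =====
-- Pre_ excludes len(user_str) > len(rand_str): there Python A raises IndexError
-- (rand_str[index] out of range); B raises the same IndexError at the same index.
def Pre_hint_func (user_str : String) (rand_str : String) : Prop :=
  user_str.toList.length ≤ rand_str.toList.length
instance (user_str : String) (rand_str : String) : Decidable (Pre_hint_func user_str rand_str) := by unfold Pre_hint_func; infer_instance
def pvWitness_hint_func : String × String := ("1234", "1243")
def Spec_hint_func (user_str : String) (rand_str : String) (out : String) : Prop := out = hint_func_alt user_str rand_str
instance (user_str : String) (rand_str : String) (out : String) : Decidable (Spec_hint_func user_str rand_str out) := by unfold Spec_hint_func; infer_instance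

-- ===== CLAIM (what is proved, stated in full; the proofs are below) =====
def Claim_equal_hint_func : Prop := ∀ (user_str : String) (rand_str : String), Dom_hint_func user_str rand_str → Pre_hint_func user_str rand_str → Spec_hint_func user_str rand_str (hint_func user_str rand_str)

-- ===== LEMMAS AND PROOFS =====

-- the canonical descending arrangement of a label list
def canonLabels (l : List Char) : List Char :=
  List.replicate (l.count 'X') 'X' ++ List.replicate (l.count 'O') 'O' ++ List.replicate (l.count '-') '-'

theorem hintLoopA_acc (u r : List Char) (fuel : Nat) :
    ∀ (index : Nat) (acc : List Char),
      hintLoopA u r fuel index acc = acc ++ hintLoopA u r fuel index [] := by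
  induction fuel with
  | zero => intro index acc; simp [hintLoopA]
  | succ f ih =>
    intro index acc
    by_cases h : index < u.length
    · simp only [hintLoopA, dif_pos h]
      split_ifs with h1 h2 <;>
        · rw [ih (index+1) (acc ++ _), ih (index+1) ([] ++ _)]
          simp
    · simp [hintLoopA, h]

theorem hintLoopA_mem (u r : List Char) (fuel : Nat) :
    ∀ (index : Nat), ∀ c ∈ hintLoopA u r fuel index [], c ∈ (['X', 'O', '-'] : List Char) := by
  induction fuel with
  | zero => intro index c hc; simp [hintLoopA] at hc
  | succ f ih =>
    intro index
    by_cases h : index < u.length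
    · simp only [hintLoopA, dif_pos h]
      split_ifs with h1 h2 <;>
        · rw [hintLoopA_acc u r f (index+1) ([] ++ _)]
          intro c hc
          rcases List.mem_append.1 hc with hc | hc
          · simp at hc; simp [hc]
          · exact ih (index+1) c hc
    · intro c hc; simp [hintLoopA, h] at hc

theorem hintCountB_eq_counts (u r : List Char) (fuel : Nat) :
    ∀ (i : Nat) (x o d : Nat),
      hintCountB u r fuel i x o d =
        (x + (hintLoopA u r fuel i []).count 'X',
         o + (hintLoopA u r fuel i []).count 'O',
         d + (hintLoopA u r fuel i []).count '-') := by
  induction fuel with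
  | zero => intro i x o d; simp [hintCountB, hintLoopA]
  | succ f ih =>
    intro i x o d
    by_cases h : i < u.length
    · simp only [hintCountB, hintLoopA, dif_pos h]
      split_ifs with h1 h2 <;>
        · rw [ih (i+1), hintLoopA_acc u r f (i+1) ([] ++ _)]
          simp
          omega
    · simp [hintCountB, hintLoopA, h]

theorem perm_canon (l : List Char) (hmem : ∀ c ∈ l, c ∈ (['X', 'O', '-'] : List Char)) :
    (canonLabels l).Perm l := by
  induction l with
  | nil => simp [canonLabels]
  | cons a t ih =>
    have ht : ∀ c ∈ t, c ∈ (['X', 'O', '-'] : List Char) := fun c hc => hmem c (List.mem_cons_of_mem a hc)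
    have ha : a = 'X' ∨ a = 'O' ∨ a = '-' := by simpa using hmem a List.mem_cons_self
    have iht := ih ht
    rcases ha with rfl | rfl | rfl
    · have e : canonLabels ('X' :: t) = 'X' :: canonLabels t := by
        simp [canonLabels, List.replicate_succ]
      rw [e]
      exact iht.cons 'X'
    · have e : canonLabels ('O' :: t)
          = List.replicate (t.count 'X') 'X' ++ 'O' :: (List.replicate (t.count 'O') 'O' ++ List.replicate (t.count '-') '-') := by
        simp [canonLabels, List.replicate_succ]
      rw [e]
      refine List.perm_middle.trans ?_
      have hp : (List.replicate (t.count 'X') 'X' ++ (List.replicate (t.count 'O') 'O' ++ List.replicate (t.count '-') '-')).Perm t := by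
        simpa [canonLabels, List.append_assoc] using iht
      exact hp.cons 'O'
    · have e : canonLabels ('-' :: t)
          = (List.replicate (t.count 'X') 'X' ++ List.replicate (t.count 'O') 'O') ++ '-' :: List.replicate (t.count '-') '-' := by
        simp [canonLabels, List.replicate_succ]
      rw [e]
      refine List.perm_middle.trans ?_
      have hp : ((List.replicate (t.count 'X') 'X' ++ List.replicate (t.count 'O') 'O') ++ List.replicate (t.count '-') '-').Perm t := by
        simpa [canonLabels, List.append_assoc] using iht
      exact hp.cons '-'

theorem canon_pairwise (l : List Char) :
    (canonLabels l).Pairwise (fun a b => b ≤ a) := by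
  unfold canonLabels
  rw [List.pairwise_append, List.pairwise_append]
  refine ⟨⟨List.pairwise_replicate.2 (Or.inr le_rfl), List.pairwise_replicate.2 (Or.inr le_rfl), ?_⟩,
    List.pairwise_replicate.2 (Or.inr le_rfl), ?_⟩
  · intro a ha b hb
    rw [List.eq_of_mem_replicate ha, List.eq_of_mem_replicate hb]; decide
  · intro a ha b hb
    rw [List.eq_of_mem_replicate hb]
    rcases List.mem_append.1 ha with ha | ha <;> rw [List.eq_of_mem_replicate ha] <;> decide

theorem sorted_labels (l : List Char) (hmem : ∀ c ∈ l, c ∈ (['X', 'O', '-'] : List Char)) :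
    PySem.List.sorted l (fun x => x) true = canonLabels l := by
  refine List.Perm.eq_of_pairwise (fun a b _ _ h1 h2 => le_antisymm h2 h1) ?_ (canon_pairwise l) ?_
  · simpa using PySem.List.sorted_pairwise_rev l (fun x => x)
  · exact (PySem.List.sorted_perm l (fun x => x) true).trans (perm_canon l hmem).symm

-- ===== VERDICT (by name: the statement is the Claim_ definition above) =====
theorem hint_func_spec : Claim_equal_hint_func := by
  intro user_str rand_str _ _
  unfold Spec_hint_func hint_func hint_func_alt
  rw [sorted_labels _ (hintLoopA_mem user_str.toList rand_str.toList user_str.toList.length 0),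
    hintCountB_eq_counts]
  simp [canonLabels]
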